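-- pv_equiv track=rewrite | github.com/sara-kassani/1000_Python_example | books/Python Workbook/lists/ex118.py | is_wbw_palindrome
-- ===== SOURCE A (Python) =====
-- import string
--
-- def is_wbw_palindrome(sentence):
--     # splitting the sentence based on whitespace
--     s_list = sentence.split()
--
--     # converting each element into a lowercase word with no punctuation
--     for i in range(len(s_list)):
--         word = s_list[i].strip(string.punctuation).lower()
--         s_list[i] = word
--
--     # creating a reversed list from the previous list
--     s_list_rev = []
--     rev_index = len(s_list) - 1
--     for i in range(len(s_list)):
--         s_list_rev.append(s_list[rev_index])
--         rev_index -= 1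
--
--     # checking if both the original and reversed list are the same
--     if s_list == s_list_rev:
--         return True
--     else:
--         return False
-- ===== SOURCE B (Python) =====
-- import string
--
-- def is_wbw_palindrome(sentence):
--     # same cleaning as A: split, strip punctuation, lowercase
--     cleaned = [w.strip(string.punctuation).lower() for w in sentence.split()]
--     # two-pointer scan inward instead of building a reversed copy
--     left, right = 0, len(cleaned) - 1
--     while left < right:
--         if cleaned[left] != cleaned[right]:
--             return False
--         left += 1
--         right -= 1
--     return True
-- ===== Notes on version B (the rewrite author's own statement) =====
-- stated objective: alternative
-- what changed: B cleans the words with a single comprehension and then compares with an inward two-pointer scan that short-circuits on the first mismatch, instead of A's in-place rewrite loop plus building a full reversed copy and comparing whole lists.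
import Mathlib
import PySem

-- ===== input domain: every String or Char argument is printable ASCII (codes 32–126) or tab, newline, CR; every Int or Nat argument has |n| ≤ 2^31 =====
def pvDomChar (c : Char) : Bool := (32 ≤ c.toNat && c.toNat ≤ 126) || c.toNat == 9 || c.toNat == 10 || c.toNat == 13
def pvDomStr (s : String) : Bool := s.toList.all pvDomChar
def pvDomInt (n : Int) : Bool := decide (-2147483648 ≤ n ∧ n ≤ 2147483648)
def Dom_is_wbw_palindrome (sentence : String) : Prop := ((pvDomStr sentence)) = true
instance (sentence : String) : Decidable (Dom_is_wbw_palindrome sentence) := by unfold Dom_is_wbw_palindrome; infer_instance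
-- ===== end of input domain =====

-- B replaces A's in-place rewrite loop + reversed-copy comparison by a comprehension plus a
-- short-circuiting two-pointer scan (alternative decomposition, same asymptotic cost).

-- string.punctuation
def pvPunct : String := "!\"#$%&'()*+,-./:;<=>?@[\\]^_`{|}~"

-- ===== PORT A =====
def is_wbw_palindrome (sentence : String) : Bool :=
  let s_list := PySem.Str.split₀ sentence
  let s_list :=
    (PySem.List.pyRange 0 (s_list.length : Int) 1).foldl
      (fun l i =>
        PySem.List.pySetD l i
          (PySem.Str.lower (PySem.Str.stripChars (PySem.List.pyGetD l i "") pvPunct))) s_list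
  let st :=
    (PySem.List.pyRange 0 (s_list.length : Int) 1).foldl
      (fun (st : List String × Int) _ =>
        (st.1 ++ [PySem.List.pyGetD s_list st.2 ""], st.2 - 1))
      ([], (s_list.length : Int) - 1)
  if s_list = st.1 then true else false

-- ===== PORT B =====
def pvTwoPtr (xs : List String) (l r : Nat) : Bool :=
  if l < r then
    if xs.getD l "" ≠ xs.getD r "" then false
    else pvTwoPtr xs (l + 1) (r - 1)
  else true
termination_by r - l

def is_wbw_palindrome_alt (sentence : String) : Bool :=
  let cleaned := (PySem.Str.split₀ sentence).map
    (fun w => PySem.Str.lower (PySem.Str.stripChars w pvPunct))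
  pvTwoPtr cleaned 0 (cleaned.length - 1)

-- ===== PRECONDITION & SPEC =====
def Spec_is_wbw_palindrome (sentence : String) (out : Bool) : Prop := out = is_wbw_palindrome_alt sentence
instance (sentence : String) (out : Bool) : Decidable (Spec_is_wbw_palindrome sentence out) := by unfold Spec_is_wbw_palindrome; infer_instance

-- ===== CLAIM (what is proved, stated in full; the proofs are below) =====
def Claim_equal_is_wbw_palindrome : Prop := ∀ (sentence : String), Dom_is_wbw_palindrome sentence → Spec_is_wbw_palindrome sentence (is_wbw_palindrome sentence)

-- ===== LEMMAS AND PROOFS =====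

-- A's first loop is an in-place map
lemma pv_foldl_setmap (f : String → String) :
    ∀ (rest done : List String),
      (PySem.List.pyRange (done.length : Int) ((done.length : Int) + (rest.length : Int)) 1).foldl
        (fun l i => PySem.List.pySetD l i (f (PySem.List.pyGetD l i ""))) (done ++ rest)
      = done ++ rest.map f := by
  intro rest
  induction rest with
  | nil =>
      intro done
      rw [PySem.List.pyRange_one_eq_nil (by norm_num)]
      simp
  | cons x rest ih =>
      intro done
      rw [PySem.List.pyRange_one_cons (by simp only [List.length_cons]; push_cast; omega)]
      simp only [List.foldl_cons]
      have hget : PySem.List.pyGetD (done ++ x :: rest) (done.length : Int) "" = x := by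
        simp [PySem.List.pyGetD_natCast]
      have hset : PySem.List.pySetD (done ++ x :: rest) (done.length : Int) (f x)
          = (done ++ [f x]) ++ rest := by
        simp [PySem.List.pySetD_natCast]
      rw [hget, hset]
      have h := ih (done ++ [f x])
      have hlen : ((done ++ [f x]).length : Int) = (done.length : Int) + 1 := by simp
      rw [hlen] at h
      simp only [List.length_cons]
      push_cast
      have hbd : (done.length : Int) + ((rest.length : Int) + 1)
          = (done.length : Int) + 1 + (rest.length : Int) := by ring
      rw [hbd, h]
      simp

-- A's second loop reads the list back to front
lemma pv_foldl_revbuild (ys : List String) :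
    ∀ (k : Nat) (acc : List String) (ri : Int),
      (PySem.List.pyRange 0 (k : Int) 1).foldl
        (fun (st : List String × Int) _ =>
          (st.1 ++ [PySem.List.pyGetD ys st.2 ""], st.2 - 1)) (acc, ri)
      = (acc ++ (List.range k).map (fun (j : Nat) => PySem.List.pyGetD ys (ri - (j : Int)) ""), ri - k) := by
  intro k
  induction k with
  | zero => intro acc ri; simp [PySem.List.pyRange_one_eq_nil]
  | succ k ih =>
      intro acc ri
      have hcast : ((k + 1 : Nat) : Int) = (k : Int) + 1 := by push_cast; ring
      rw [hcast, PySem.List.pyRange_one_succ_right (by positivity)]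
      rw [List.foldl_append, ih]
      simp only [List.foldl_cons, List.foldl_nil, List.range_succ, Prod.mk.injEq]
      refine ⟨by simp, by omega⟩

-- the back-to-front reads are exactly reverse
lemma pv_map_range_reverse (ys : List String) :
    (List.range ys.length).map (fun (j : Nat) => PySem.List.pyGetD ys (((ys.length : Int) - 1) - (j : Int)) "")
      = ys.reverse := by
  apply List.ext_getElem
  · simp
  · intro i h1 h2
    simp only [List.getElem_map, List.getElem_range, List.getElem_reverse]
    have hi : i < ys.length := by simpa using h2
    have hnn : (0 : Int) ≤ ((ys.length : Int) - 1) - (i : Int) := by omega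
    rw [PySem.List.pyGetD_eq_getElem ys "" hnn (by omega)]
    congr 1
    omega

-- the two-pointer loop checks exactly the mirrored pairs
lemma pvTwoPtr_eq_true_iff (xs : List String) (l r : Nat) :
    pvTwoPtr xs l r = true ↔
      ∀ i j, 0 ≤ i → i < j → j ≤ r → i + j = l + r → xs.getD i "" = xs.getD j "" := by
  fun_induction pvTwoPtr xs l r with
  | case1 a b hab hne =>
      simp only [Bool.false_eq_true, false_iff]
      intro h
      exact hne (h a b (Nat.zero_le _) hab le_rfl rfl)
  | case2 a b hab hne ih =>
      have heq : xs.getD a "" = xs.getD b "" := not_not.mp hne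
      rw [ih]
      constructor
      · intro h i j _ hij hjb hsum
        rcases eq_or_ne i a with rfl | hia
        · have : j = b := by omega
          subst this; exact heq
        · rcases eq_or_ne j b with rfl | hjb'
          · have : i = a := by omega
            exact absurd this hia
          · exact h i j (Nat.zero_le _) hij (by omega) (by omega)
      · intro h i j h1 h2 h3 h4
        exact h i j (Nat.zero_le _) h2 (by omega) (by omega)
  | case3 a b hab =>
      simp only [true_iff]
      intro i j h1 h2 h3 h4
      exfalso; omega

-- list palindromicity as mirrored pairs
lemma pv_reverse_iff_pairs (xs : List String) :
    xs = xs.reverse ↔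
      ∀ i j, 0 ≤ i → i < j → j ≤ xs.length - 1 → i + j = 0 + (xs.length - 1) →
        xs.getD i "" = xs.getD j "" := by
  constructor
  · intro h i j _ hij hjb hsum
    have hj : j < xs.length := by omega
    have hi : i < xs.length := by omega
    rw [List.getD_eq_getElem _ _ hi, List.getD_eq_getElem _ _ hj]
    rw [List.getElem_of_eq h hi, List.getElem_reverse]
    congr 1
    omega
  · intro h
    apply List.ext_getElem (by simp)
    intro i h1 h2
    rw [List.getElem_reverse]
    rcases lt_trichotomy i (xs.length - 1 - i) with hlt | heq | hgt
    · have hh := h i (xs.length - 1 - i) (Nat.zero_le _) hlt (by omega) (by omega)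
      rw [List.getD_eq_getElem _ _ h1, List.getD_eq_getElem _ _ (by omega)] at hh
      exact hh
    · congr 1
    · have hh := h (xs.length - 1 - i) i (Nat.zero_le _) hgt (by omega) (by omega)
      rw [List.getD_eq_getElem _ _ (by omega), List.getD_eq_getElem _ _ h1] at hh
      exact hh.symm

-- ===== VERDICT (by name: the statement is the Claim_ definition above) =====
theorem is_wbw_palindrome_spec : Claim_equal_is_wbw_palindrome := by
  unfold Claim_equal_is_wbw_palindrome Spec_is_wbw_palindrome
  intro sentence _
  simp only [is_wbw_palindrome, is_wbw_palindrome_alt]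
  set f := fun w => PySem.Str.lower (PySem.Str.stripChars w pvPunct) with hf
  set ws := PySem.Str.split₀ sentence with hws
  have h1 : (PySem.List.pyRange 0 (ws.length : Int) 1).foldl
      (fun l i => PySem.List.pySetD l i (f (PySem.List.pyGetD l i ""))) ws
      = ws.map f := by
    have := pv_foldl_setmap f ws []
    simpa using this
  rw [h1]
  set ys := ws.map f with hys
  have h2 := pv_foldl_revbuild ys ys.length [] ((ys.length : Int) - 1)
  rw [h2]
  simp only [List.nil_append]
  have h3 : (List.range ys.length).map
      (fun (j : Nat) => PySem.List.pyGetD ys (((ys.length : Int) - 1) - (j : Int)) "") = ys.reverse :=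
    pv_map_range_reverse ys
  rw [h3]
  by_cases hp : ys = ys.reverse
  · rw [if_pos hp]
    exact ((pvTwoPtr_eq_true_iff ys 0 (ys.length - 1)).mpr
      ((pv_reverse_iff_pairs ys).mp hp)).symm
  · rw [if_neg hp]
    have hfalse : ¬ (pvTwoPtr ys 0 (ys.length - 1) = true) := fun ht =>
      hp ((pv_reverse_iff_pairs ys).mpr ((pvTwoPtr_eq_true_iff ys 0 (ys.length - 1)).mp ht))
    exact ((Bool.eq_false_iff).mpr hfalse).symm
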